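-- pv_equiv track=rewrite | github.com/qswypary/tuanTool | main.py | truncate_string
-- ===== SOURCE A (Python) =====
-- def truncate_string(s):
--     # 创建一个列表来存储反向查找结果
--     result = []
--     # 从右侧开始迭代字符串
--     for char in reversed(s):
--         # 如果字符是数字且不是'0'，保存在结果列表中
--         if char.isdigit() and char != '0':
--             result.append(char)
--         else:
--             # 遇到'0'或非数字字符就结束
--             break
--     # 因为是逆序迭代，结果列表需要反转并连接到一个字符串
--     return ''.join(reversed(result))
-- ===== SOURCE B (Python) =====
-- def truncate_string(s):
--     # Forward single pass tracking the start index of the current run of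
--     # non-'0' digits; returns the suffix if the run reaches the end.
--     in_run = False
--     start = 0
--     for i, char in enumerate(s):
--         if char.isdigit() and char != '0':
--             if not in_run:
--                 start = i
--                 in_run = True
--         else:
--             in_run = False
--     return s[start:] if in_run else ''
-- ===== Notes on version B (the rewrite author's own statement) =====
-- stated objective: alternative
-- what changed: Replaces the reverse scan that builds a list and reverses it with a forward enumerate pass that tracks the start index of the current nonzero-digit run and returns the slice s[start:].
import Mathlib
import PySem

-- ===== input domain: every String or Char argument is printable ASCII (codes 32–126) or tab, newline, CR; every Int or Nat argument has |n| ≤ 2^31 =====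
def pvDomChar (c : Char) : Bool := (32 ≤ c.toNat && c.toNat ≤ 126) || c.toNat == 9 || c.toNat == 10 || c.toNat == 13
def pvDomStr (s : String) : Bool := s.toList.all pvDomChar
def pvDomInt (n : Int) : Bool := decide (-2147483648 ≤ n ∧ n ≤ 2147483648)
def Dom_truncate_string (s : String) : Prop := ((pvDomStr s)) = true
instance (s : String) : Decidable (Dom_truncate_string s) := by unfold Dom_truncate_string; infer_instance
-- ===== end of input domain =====

-- B replaces A's reverse scan (build a list, reverse it) by a forward pass tracking
-- the start index of the current nonzero-digit run; same return value (alternative decomposition).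

-- ===== PORT A =====
-- the 'for char in reversed(s): … break' loop, carrying the growing result list
def truncAloop (result : List Char) : List Char → List Char
  | [] => result
  | c :: rest =>
      if PySem.Chars.isdigit c && c != '0' then truncAloop (result ++ [c]) rest
      else result

def truncate_string (s : String) : String :=
  String.ofList (truncAloop [] s.toList.reverse).reverse

-- ===== PORT B =====
-- one step of the 'for i, char in enumerate(s)' loop over the state (in_run, start)
def truncBstep (st : Bool × Int) (p : Int × Char) : Bool × Int :=
  if PySem.Chars.isdigit p.2 && p.2 != '0' then
    if !st.1 then (true, p.1) else st
  else (false, st.2)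

def truncate_string_alt (s : String) : String :=
  let fin := (PySem.List.enumerate s.toList).foldl truncBstep (false, 0)
  if fin.1 then PySem.Str.slice s (some fin.2) none else ""

-- ===== PRECONDITION & SPEC =====
def Spec_truncate_string (s : String) (out : String) : Prop := out = truncate_string_alt s
instance (s : String) (out : String) : Decidable (Spec_truncate_string s out) := by unfold Spec_truncate_string; infer_instance

-- ===== CLAIM (what is proved, stated in full; the proofs are below) =====
def Claim_equal_truncate_string : Prop := ∀ (s : String), Dom_truncate_string s → Spec_truncate_string s (truncate_string s)

-- ===== LEMMAS AND PROOFS =====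
-- the character predicate both loops test
def pvPred (c : Char) : Bool := PySem.Chars.isdigit c && c != '0'

lemma truncAloop_eq (l acc : List Char) : truncAloop acc l = acc ++ l.takeWhile pvPred := by
  induction l generalizing acc with
  | nil => simp [truncAloop]
  | cons c rest ih =>
      simp only [truncAloop]
      by_cases h : (PySem.Chars.isdigit c && c != '0') = true
      · have hp : pvPred c = true := h
        simp [h, ih, hp]
      · rw [Bool.not_eq_true] at h
        have hp : pvPred c = false := h
        simp [h, hp]

-- invariant of B's forward fold: when in_run holds, start marks exactly the
-- trailing run of pvPred-characters; otherwise the trailing run is empty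
lemma truncB_inv (l : List Char) :
    ((((PySem.List.enumerate l).foldl truncBstep (false, 0)).1 = true →
        0 ≤ ((PySem.List.enumerate l).foldl truncBstep (false, 0)).2 ∧
        ((PySem.List.enumerate l).foldl truncBstep (false, 0)).2.toNat ≤ l.length ∧
        l.drop ((PySem.List.enumerate l).foldl truncBstep (false, 0)).2.toNat
          = (l.reverse.takeWhile pvPred).reverse) ∧
     ((((PySem.List.enumerate l).foldl truncBstep (false, 0)).1 = false →
        l.reverse.takeWhile pvPred = []))) := by
  induction l using List.reverseRecOn with
  | nil => simp
  | append_singleton l c ih =>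
      rcases ih with ⟨ih1, ih2⟩
      rw [PySem.List.enumerate_append]
      simp only [PySem.List.enumerate_cons, PySem.List.enumerate_nil, List.foldl_append,
        List.foldl_cons, List.foldl_nil]
      set r := (PySem.List.enumerate l).foldl truncBstep (false, 0) with hr
      by_cases hp : pvPred c = true
      · have hpw : (PySem.Chars.isdigit c && c != '0') = true := hp
        cases hb : r.1 with
        | true =>
            obtain ⟨h0, hle, hdrop⟩ := ih1 hb
            have hstep : truncBstep r (0 + (l.length : Int), c) = r := by
              simp [truncBstep, hpw, hb]
            rw [hstep]
            refine ⟨fun _ => ⟨h0, ?_, ?_⟩, fun hfalse => by rw [hb] at hfalse; exact absurd hfalse (by simp)⟩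
            · simp only [List.length_append, List.length_cons, List.length_nil]
              omega
            · rw [List.drop_append_of_le_length hle, hdrop]
              simp [hp]
        | false =>
            have hnil := ih2 hb
            have hstep : truncBstep r (0 + (l.length : Int), c) = (true, 0 + (l.length : Int)) := by
              simp [truncBstep, hpw, hb]
            rw [hstep]
            refine ⟨fun _ => ⟨by positivity, ?_, ?_⟩, fun hfalse => by simp at hfalse⟩
            · simp
            · simp [hp, hnil]
      · rw [Bool.not_eq_true] at hp
        have hpw : (PySem.Chars.isdigit c && c != '0') = false := hp
        have hstep : truncBstep r (0 + (l.length : Int), c) = (false, r.2) := by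
          simp [truncBstep, hpw]
        rw [hstep]
        refine ⟨fun htrue => by simp at htrue, fun _ => ?_⟩
        simp [hp]

-- ===== VERDICT (by name: the statement is the Claim_ definition above) =====
theorem truncate_string_spec : Claim_equal_truncate_string := by
  intro s _
  unfold Spec_truncate_string truncate_string truncate_string_alt
  rw [truncAloop_eq]
  obtain ⟨h1, h2⟩ := truncB_inv s.toList
  set r := (PySem.List.enumerate s.toList).foldl truncBstep (false, 0) with hr
  cases hb : r.1 with
  | true =>
      obtain ⟨h0, hle, hdrop⟩ := h1 hb
      simp only [hb, if_true]
      have hsl : PySem.Str.slice s (some r.2) none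
          = String.ofList (List.drop r.2.toNat s.toList) := by
        simp [PySem.Str.slice, PySem.Chars.slice, PySem.List.slice_from _ h0]
      rw [hsl, hdrop]
      simp
  | false =>
      have hnil := h2 hb
      simp [hb, hnil]
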